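-- pv_equiv track=rewrite | github.com/vlaskinvlad/codequizes | ginterview/3.py | max_a7
-- ===== SOURCE A (Python) =====
-- def max_a7(a):
--     n = len(a)
--     q = 0
--     mi = None
--     mj = None
--     for i in range(n):
--         for j in range(i+1, n):
--             m = sum(a[i:j]) %  7
--             if m > q:
--                 q = m
--                 mi = i
--                 mj = j
--     return q, mi, mj
-- ===== SOURCE B (Python) =====
-- def max_a7(a):
--     n = len(a)
--     pre = [0]
--     s = 0
--     for x in a:
--         s += x
--         pre.append(s)
--     cand = [((pre[j] - pre[i]) % 7, i, j)
--             for i in range(n) for j in range(i + 1, n)]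
--     q = max((m for m, _, _ in cand), default=0)
--     if q == 0:
--         return 0, None, None
--     mi = None
--     mj = None
--     for m, i, j in cand:
--         if m == q:
--             mi, mj = i, j
--             break
--     return q, mi, mj
-- ===== Notes on version B (the rewrite author's own statement) =====
-- stated objective: faster
-- what changed: B precomputes prefix sums, materialises the flat list of (mod-7 value, i, j) candidates in one comprehension, then takes the maximum value and scans once for its first occurrence, instead of A's nested loops that re-sum each slice and maintain a running strict-max state; O(n^3) becomes O(n^2).
import Mathlib
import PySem

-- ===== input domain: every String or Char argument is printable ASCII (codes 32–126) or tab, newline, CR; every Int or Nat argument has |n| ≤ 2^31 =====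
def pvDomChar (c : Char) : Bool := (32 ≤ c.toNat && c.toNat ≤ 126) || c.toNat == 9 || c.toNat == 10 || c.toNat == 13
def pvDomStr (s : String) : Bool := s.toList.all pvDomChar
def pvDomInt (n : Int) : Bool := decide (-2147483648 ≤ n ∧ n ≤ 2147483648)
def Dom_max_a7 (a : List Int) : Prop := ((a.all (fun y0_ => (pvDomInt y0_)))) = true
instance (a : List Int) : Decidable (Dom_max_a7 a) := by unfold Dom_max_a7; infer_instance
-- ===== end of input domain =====

-- B builds prefix sums and the flat candidate list once, then takes max + first occurrence,
-- replacing A's nested slice-summing strict-max loops; objective: faster (O(n^3) -> O(n^2)).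

-- ===== PORT A =====
def max_a7 (a : List Int) : Int × Option Int × Option Int :=
  let n : Int := a.length
  (PySem.List.pyRange 0 n 1).foldl (fun st i =>
    (PySem.List.pyRange (i + 1) n 1).foldl (fun st j =>
      let m := PySem.Int.mod (PySem.List.slice a (some i) (some j)).sum 7
      if st.1 < m then (m, some i, some j) else st) st)
    (0, none, none)

-- ===== PORT B =====
def max_a7_alt (a : List Int) : Int × Option Int × Option Int :=
  let n : Int := a.length
  let pre := (a.foldl (fun (st : List Int × Int) x => (st.1 ++ [st.2 + x], st.2 + x)) ([0], 0)).1
  let cand := (PySem.List.pyRange 0 n 1).flatMap (fun i =>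
    (PySem.List.pyRange (i + 1) n 1).map (fun j =>
      (PySem.Int.mod (PySem.List.pyGetD pre j 0 - PySem.List.pyGetD pre i 0) 7, i, j)))
  let q := (PySem.List.max? (cand.map (fun t => t.1)) (fun m => m)).getD 0
  if q == 0 then (0, none, none)
  else
    match cand.find? (fun t => t.1 == q) with
    | some t => (q, some t.2.1, some t.2.2)
    | none => (q, none, none)

-- ===== PRECONDITION & SPEC =====
def Spec_max_a7 (a : List Int) (out : Int × Option Int × Option Int) : Prop := out = max_a7_alt a
instance (a : List Int) (out : Int × Option Int × Option Int) : Decidable (Spec_max_a7 a out) := by unfold Spec_max_a7; infer_instance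

-- ===== CLAIM (what is proved, stated in full; the proofs are below) =====
def Claim_equal_max_a7 : Prop := ∀ (a : List Int), Dom_max_a7 a → Spec_max_a7 a (max_a7 a)

-- ===== LEMMAS AND PROOFS =====

-- B's accumulation loop builds exactly the scanl of partial sums.
lemma fold_pre (a : List Int) (acc : List Int) (s : Int) :
    a.foldl (fun (st : List Int × Int) x => (st.1 ++ [st.2 + x], st.2 + x)) (acc, s)
      = (acc ++ (List.scanl (· + ·) s a).tail, s + a.sum) := by
  induction a generalizing acc s with
  | nil => simp
  | cons x a ih =>
      simp only [List.foldl_cons, ih, List.scanl_cons]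
      cases a <;> (simp [List.scanl]; try ring)

lemma pre_eq_scanl (a : List Int) :
    ([0] ++ (List.scanl (· + ·) (0 : Int) a).tail) = List.scanl (· + ·) 0 a := by
  cases a <;> simp [List.scanl]

-- scanl of sums, indexed: entry k is the sum of the first k elements.
lemma scanl_getD (a : List Int) (s : Int) (k : Nat) (hk : k ≤ a.length) :
    (List.scanl (· + ·) s a).getD k 0 = s + (a.take k).sum := by
  induction a generalizing s k with
  | nil => obtain rfl := Nat.le_zero.mp hk; simp [List.scanl]
  | cons x a ih =>
      cases k with
      | zero => simp [List.scanl]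
      | succ k =>
          simp only [List.scanl_cons, List.getD_cons_succ, List.take_succ_cons, List.sum_cons]
          rw [ih _ _ (by simpa using hk)]; ring

-- sum of a contiguous slice is a difference of prefix sums.
lemma slice_sum (a : List Int) (i j : Nat) (hij : i ≤ j) :
    (((a.drop i).take (j - i)).sum : Int) = (a.take j).sum - (a.take i).sum := by
  have h : a.take j = a.take i ++ (a.drop i).take (j - i) := by
    rw [← List.take_add, Nat.add_sub_cancel' hij]
  rw [h, List.sum_append]; ring

-- running-max fold over the first components, as A's loop maintains it
def fmax (L : List (Int × Int × Int)) (q0 : Int) : Int :=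
  L.foldl (fun q t => max q t.1) q0

lemma fmax_ge_init (L : List (Int × Int × Int)) (q0 : Int) : q0 ≤ fmax L q0 := by
  induction L generalizing q0 with
  | nil => simp [fmax]
  | cons t L ih => exact le_trans (le_max_left _ _) (ih (max q0 t.1))

lemma fmax_cons (t : Int × Int × Int) (L : List (Int × Int × Int)) (q0 : Int) :
    fmax (t :: L) q0 = fmax L (max q0 t.1) := rfl

lemma fmax_mem (L : List (Int × Int × Int)) (q0 : Int) (h : q0 < fmax L q0) :
    ∃ t ∈ L, t.1 = fmax L q0 := by
  induction L generalizing q0 with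
  | nil => simp [fmax] at h
  | cons t L ih =>
      rw [fmax_cons] at h ⊢
      by_cases h2 : max q0 t.1 < fmax L (max q0 t.1)
      · obtain ⟨s, hs, he⟩ := ih (max q0 t.1) h2
        exact ⟨s, List.mem_cons_of_mem _ hs, he⟩
      · have : fmax L (max q0 t.1) = max q0 t.1 :=
          le_antisymm (not_lt.mp h2) (fmax_ge_init _ _)
        refine ⟨t, List.mem_cons_self, ?_⟩
        rw [this]
        rcases max_cases q0 t.1 with ⟨he, _⟩ | ⟨he, _⟩ <;> omega

-- find? over a cons, specialised to the first-component predicate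
lemma find?_cons_ne (t : Int × Int × Int) (L : List (Int × Int × Int)) (c : Int) (h : t.1 ≠ c) :
    List.find? (fun s : Int × Int × Int => s.1 == c) (t :: L)
      = List.find? (fun s : Int × Int × Int => s.1 == c) L := by
  simp [h]

lemma find?_cons_self (t : Int × Int × Int) (L : List (Int × Int × Int)) (c : Int) (h : t.1 = c) :
    List.find? (fun s : Int × Int × Int => s.1 == c) (t :: L) = some t := by
  simp [h]

-- A's first-strict-max fold, characterised as (running max, first element attaining it).
lemma firstmax_fold (L : List (Int × Int × Int)) (q0 : Int) (o : Option Int × Option Int) :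
    L.foldl (fun st t => if st.1 < t.1 then (t.1, some t.2.1, some t.2.2) else st) (q0, o)
      = (fmax L q0,
          if q0 < fmax L q0 then
            (match L.find? (fun t => t.1 == fmax L q0) with
             | some t => (some t.2.1, some t.2.2)
             | none => o)
          else o) := by
  induction L generalizing q0 o with
  | nil => simp [fmax]
  | cons t L ih =>
      rw [List.foldl_cons, fmax_cons]
      by_cases h1 : q0 < t.1
      · rw [if_pos (show ((q0, o) : Int × Option Int × Option Int).1 < t.1 from h1), ih]
        have hm : max q0 t.1 = t.1 := max_eq_right (le_of_lt h1)
        rw [hm]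
        have hle : t.1 ≤ fmax L t.1 := fmax_ge_init L t.1
        by_cases h2 : t.1 < fmax L t.1
        · have hq : q0 < fmax L t.1 := lt_trans h1 h2
          rw [if_pos h2, if_pos hq, find?_cons_ne t L _ (by omega)]
          obtain ⟨s, hs, he⟩ := fmax_mem L t.1 h2
          obtain ⟨u, hu⟩ : ∃ u, L.find? (fun s : Int × Int × Int => s.1 == fmax L t.1) = some u := by
            cases hfind : L.find? (fun s : Int × Int × Int => s.1 == fmax L t.1) with
            | some u => exact ⟨u, rfl⟩
            | none =>
                exfalso
                have := List.find?_eq_none.mp hfind s hs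
                simp [he] at this
          rw [hu]
        · have heq : fmax L t.1 = t.1 := le_antisymm (not_lt.mp h2) hle
          rw [heq, if_neg (lt_irrefl t.1), if_pos h1, find?_cons_self t L _ rfl]
      · rw [if_neg (show ¬ (((q0, o) : Int × Option Int × Option Int).1 < t.1) from h1), ih]
        have hm : max q0 t.1 = q0 := max_eq_left (not_lt.mp h1)
        rw [hm]
        by_cases h2 : q0 < fmax L q0
        · rw [find?_cons_ne t L _ (by omega)]
        · rw [if_neg h2, if_neg h2]

-- every candidate's value is the Python mod-7 of something, hence in [0, 7)
lemma mod7_nonneg (x : Int) : 0 ≤ PySem.Int.mod x 7 :=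
  PySem.Int.mod_nonneg x (by norm_num)

-- Python max-with-default over first components equals the running max from 0 (values ≥ 0).
lemma max_getD_eq_fmax (L : List (Int × Int × Int)) (h : ∀ t ∈ L, 0 ≤ t.1) :
    (PySem.List.max? (L.map (fun t => t.1)) (fun m => m)).getD 0 = fmax L 0 := by
  cases L with
  | nil => simp [fmax, PySem.List.max?]
  | cons t L =>
      rw [List.map_cons, PySem.List.max?_id_cons, Option.getD_some, List.foldl_map,
          fmax_cons, max_eq_right (h t List.mem_cons_self)]
      rfl

-- ===== VERDICT (by name: the statement is the Claim_ definition above) =====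
theorem max_a7_spec : Claim_equal_max_a7 := by
  intro a _
  unfold Spec_max_a7 max_a7 max_a7_alt
  simp only [fold_pre, zero_add, pre_eq_scanl]
  set n : Int := (a.length : Int) with hn
  set pre := List.scanl (· + ·) (0 : Int) a with hpre
  set cand := (PySem.List.pyRange 0 n 1).flatMap (fun i =>
    (PySem.List.pyRange (i + 1) n 1).map (fun j =>
      (PySem.Int.mod (PySem.List.pyGetD pre j 0 - PySem.List.pyGetD pre i 0) 7, i, j))) with hcand
  -- Step 1: A's nested fold is the first-strict-max fold over the flat candidate list.
  have hpiv : ∀ (i : Int), 0 ≤ i → i ≤ n →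
      PySem.List.pyGetD pre i 0 = (a.take i.toNat).sum := by
    intro i h0 hlen
    conv_lhs => rw [show i = ((i.toNat : Nat) : Int) by omega]
    rw [PySem.List.pyGetD_natCast, hpre, scanl_getD a 0 i.toNat (by omega), zero_add]
  have hA : (PySem.List.pyRange 0 n 1).foldl (fun st i =>
      (PySem.List.pyRange (i + 1) n 1).foldl (fun st j =>
        let m := PySem.Int.mod (PySem.List.slice a (some i) (some j)).sum 7
        if st.1 < m then (m, some i, some j) else st) st)
      ((0 : Int), (none : Option Int), (none : Option Int))
      = cand.foldl (fun st t => if st.1 < t.1 then (t.1, some t.2.1, some t.2.2) else st)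
          (0, none, none) := by
    rw [hcand, List.foldl_flatMap]
    refine PySem.List.foldl_congr_mem _ _ _ _ ?_
    intro st i hi
    rw [PySem.List.mem_pyRange_one] at hi
    rw [List.foldl_map]
    refine PySem.List.foldl_congr_mem _ _ _ _ ?_
    intro st' j hj
    rw [PySem.List.mem_pyRange_one] at hj
    have h0i : 0 ≤ i := hi.1
    have h0j : 0 ≤ j := by omega
    have hij : i.toNat ≤ j.toNat := by omega
    have hslice : PySem.List.slice a (some i) (some j) = (a.drop i.toNat).take (j.toNat - i.toNat) :=
      PySem.List.slice_toNat a h0i h0j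
    rw [hslice, hpiv i h0i (by omega), hpiv j h0j (by omega),
        slice_sum a i.toNat j.toNat hij]
  rw [hA, firstmax_fold]
  -- Step 2: B's max-with-default is the same running max, and the branches line up.
  have hnn : ∀ t ∈ cand, 0 ≤ t.1 := by
    intro t ht
    rw [hcand] at ht
    simp only [List.mem_flatMap, List.mem_map] at ht
    obtain ⟨i, _, j, _, rfl⟩ := ht
    exact mod7_nonneg _
  rw [max_getD_eq_fmax cand hnn]
  have h0 : 0 ≤ fmax cand 0 := fmax_ge_init cand 0
  by_cases hq : fmax cand 0 = 0
  · simp [hq]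
  · have hlt : 0 < fmax cand 0 := lt_of_le_of_ne h0 (Ne.symm hq)
    have hbeq : (fmax cand 0 == 0) = false := by simp [hq]
    simp only [hlt, if_pos, hbeq, Bool.false_eq_true, if_false]
    cases hfind : cand.find? (fun t => t.1 == fmax cand 0) with
    | some t => rfl
    | none => rfl
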